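-- pv_equiv track=rewrite | github.com/abhiramasonny/jaithon | scripts/cleanup_comments.py | strip_jai_comments
-- ===== SOURCE A (Python) =====
-- def strip_jai_comments(text: str, keep_test_header: bool) -> str:
--     lines = text.splitlines(True)
--
--     header_end = 0
--     if keep_test_header:
--         i = 0
--         while i < len(lines):
--             s = lines[i].lstrip()
--             if s.startswith("#"):
--                 header_end = i + 1
--                 i += 1
--                 continue
--             if s.strip() == "":
--                 header_end = i + 1
--                 i += 1
--                 continue
--             break
--
--     def strip_inline(line: str) -> str:
--         in_string = False
--         escaped = False
--         for i, ch in enumerate(line):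
--             if in_string:
--                 if escaped:
--                     escaped = False
--                 elif ch == "\\":
--                     escaped = True
--                 elif ch == '"':
--                     in_string = False
--                 continue
--             else:
--                 if ch == '"':
--                     in_string = True
--                     continue
--                 if ch == "#":
--                     return line[:i].rstrip() + ("\n" if line.endswith("\n") else "")
--         return line
--
--     out: list[str] = []
--     out.extend(lines[:header_end])
--
--     for line in lines[header_end:]:
--         stripped = line.lstrip()
--         if stripped.startswith("#"):
--             continue
--         out.append(strip_inline(line))
--
--     # Collapse excessive blank lines (keep at most 1).
--     collapsed: list[str] = []
--     blank = 0
--     for line in out: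
--         if line.strip() == "":
--             blank += 1
--             if blank <= 1:
--                 collapsed.append("\n" if line.endswith("\n") else line)
--         else:
--             blank = 0
--             collapsed.append(line)
--
--     return "".join(collapsed)
-- ===== SOURCE B (Python) =====
-- def _cut(line):
--     i, n = 0, len(line)
--     while i < n:
--         c = line[i]
--         if c == '"':
--             i += 1
--             while i < n:
--                 if line[i] == "\\":
--                     i += 2
--                 elif line[i] == '"':
--                     i += 1
--                     break
--                 else:
--                     i += 1
--         elif c == "#":
--             return line[:i].rstrip() + ("\n" if line.endswith("\n") else "")
--         else:
--             i += 1
--     return line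
--
--
-- def strip_jai_comments(text: str, keep_test_header: bool) -> str:
--     out = []
--     in_header = keep_test_header
--     blank = 0
--
--     def emit(line):
--         nonlocal blank
--         if line.strip() == "":
--             blank += 1
--             if blank <= 1:
--                 out.append("\n" if line.endswith("\n") else line)
--         else:
--             blank = 0
--             out.append(line)
--
--     for line in text.splitlines(True):
--         s = line.lstrip()
--         if in_header and (s.startswith("#") or s.strip() == ""):
--             emit(line)
--             continue
--         in_header = False
--         if s.startswith("#"):
--             continue
--         emit(_cut(line))
--     return "".join(out)
-- ===== Notes on version B (the rewrite author's own statement) =====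
-- stated objective: alternative
-- what changed: Replaces A's three sequential passes (header index scan, filter/strip pass, blank-collapse pass over the intermediate list) with one single-pass state machine over the lines carrying an in_header flag and a blank-run counter, and replaces the boolean in_string/escaped character scan with an index loop that skips whole string literals via a nested loop.
import Mathlib
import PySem

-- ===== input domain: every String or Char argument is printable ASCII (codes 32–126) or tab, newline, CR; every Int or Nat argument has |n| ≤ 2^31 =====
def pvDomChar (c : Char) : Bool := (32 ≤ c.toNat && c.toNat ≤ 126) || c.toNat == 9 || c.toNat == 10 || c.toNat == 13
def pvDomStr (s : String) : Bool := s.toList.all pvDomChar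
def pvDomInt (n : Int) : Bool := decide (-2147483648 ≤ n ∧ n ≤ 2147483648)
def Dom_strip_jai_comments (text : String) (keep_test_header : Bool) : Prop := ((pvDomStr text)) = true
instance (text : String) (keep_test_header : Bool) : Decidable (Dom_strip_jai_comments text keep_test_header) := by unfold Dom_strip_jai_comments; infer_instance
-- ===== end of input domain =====

-- B is a single-pass state machine (in_header flag + blank-run counter) replacing A's three passes; return values proved equal, no side effects involved.

-- shared helper: text.splitlines(True); exact on the stated domain (tab/newline/CR + printable ASCII),
-- where the only line boundaries are '\n', '\r' and '\r\n'.
def pvSplitKeep : List Char → List Char → List String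
  | [], cur => if cur.isEmpty then [] else [String.mk cur.reverse]
  | '\r' :: '\n' :: rest, cur => String.mk (('\n' :: '\r' :: cur).reverse) :: pvSplitKeep rest []
  | '\n' :: rest, cur => String.mk (('\n' :: cur).reverse) :: pvSplitKeep rest []
  | '\r' :: rest, cur => String.mk (('\r' :: cur).reverse) :: pvSplitKeep rest []
  | c :: rest, cur => pvSplitKeep rest (c :: cur)
  termination_by cs _ => cs.length

-- ===== PORT A =====
-- the 'while i < len(lines)' header loop, as structural recursion over the remaining suffix
def hdrA : List String → Nat → Nat → Nat
  | [], _, he => he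
  | l :: rest, i, he =>
    let s := PySem.Str.lstrip l
    if PySem.Str.startswith s "#" then hdrA rest (i + 1) (i + 1)
    else if PySem.Str.strip s = "" then hdrA rest (i + 1) (i + 1)
    else he

-- strip_inline's character loop: (in_string, escaped) state, returns the index of the cutting '#'
def inlineGoA : List Char → Nat → Bool → Bool → Option Nat
  | [], _, _, _ => none
  | c :: rest, i, inStr, esc =>
    if inStr then
      if esc then inlineGoA rest (i + 1) true false
      else if c = '\\' then inlineGoA rest (i + 1) true true
      else if c = '"' then inlineGoA rest (i + 1) false false
      else inlineGoA rest (i + 1) true false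
    else
      if c = '"' then inlineGoA rest (i + 1) true false
      else if c = '#' then some i
      else inlineGoA rest (i + 1) false false

-- line[:i] for the found 0 ≤ i < len(line) is List.take i — exact
def inlineA (l : String) : String :=
  match inlineGoA l.toList 0 false false with
  | some i => String.mk (PySem.Chars.rstrip (l.toList.take i)) ++ (if PySem.Str.endswith l "\n" then "\n" else "")
  | none => l

def collA (st : List String × Int) (l : String) : List String × Int :=
  if PySem.Str.strip l = "" then
    let b := st.2 + 1
    (if b ≤ 1 then st.1 ++ [if PySem.Str.endswith l "\n" then "\n" else l] else st.1, b)
  else (st.1 ++ [l], 0)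

def strip_jai_comments (text : String) (keep_test_header : Bool) : String :=
  let lines := pvSplitKeep text.toList []
  let header_end := if keep_test_header then hdrA lines 0 0 else 0
  -- lines[:header_end] / lines[header_end:] with 0 ≤ header_end ≤ len(lines): take/drop — exact
  let out := (lines.drop header_end).foldl
    (fun acc l => if PySem.Str.startswith (PySem.Str.lstrip l) "#" then acc else acc ++ [inlineA l])
    (lines.take header_end)
  PySem.Str.join "" ((out.foldl collA ([], 0)).1)

-- ===== PORT B =====
-- _cut's inner while: skip a string literal, returning the remaining chars and the index after it
def skipStrB : List Char → Nat → List Char × Nat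
  | [], i => ([], i)
  | c :: rest, i =>
    if c = '\\' then skipStrB (rest.drop 1) (i + 2)
    else if c = '"' then (rest, i + 1)
    else skipStrB rest (i + 1)
  termination_by cs _ => cs.length
  decreasing_by
  · simp
  · simp

theorem skipStrB_len : ∀ (cs : List Char) (i : Nat), (skipStrB cs i).1.length ≤ cs.length := by
  intro cs i
  fun_induction skipStrB cs i with
  | case1 => simp [skipStrB]
  | case2 rest i ih =>
    simp [skipStrB]
    calc (skipStrB rest.tail (i + 2)).1.length ≤ rest.tail.length := by simpa using ih
      _ ≤ rest.length + 1 := by simp [List.length_tail]; omega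
  | case3 => simp [skipStrB]
  | case4 c rest i h1 h2 ih => simp [skipStrB]; exact Nat.le_succ_of_le ih

def cutGoB : List Char → Nat → Option Nat
  | [], _ => none
  | c :: rest, i =>
    if c = '"' then
      let p := skipStrB rest (i + 1)
      cutGoB p.1 p.2
    else if c = '#' then some i
    else cutGoB rest (i + 1)
  termination_by cs _ => cs.length
  decreasing_by
  · exact Nat.lt_succ_of_le (skipStrB_len rest (i + 1))
  · simp

def cutB (l : String) : String :=
  match cutGoB l.toList 0 with
  | some i => String.mk (PySem.Chars.rstrip (l.toList.take i)) ++ (if PySem.Str.endswith l "\n" then "\n" else "")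
  | none => l

def emitB (st : Int × List String) (l : String) : Int × List String :=
  if PySem.Str.strip l = "" then
    (st.1 + 1, if st.1 + 1 ≤ 1 then st.2 ++ [if PySem.Str.endswith l "\n" then "\n" else l] else st.2)
  else (0, st.2 ++ [l])

def stepB (st : Bool × Int × List String) (l : String) : Bool × Int × List String :=
  let s := PySem.Str.lstrip l
  if st.1 && (PySem.Str.startswith s "#" || PySem.Str.strip s == "") then
    let p := emitB st.2 l
    (true, p)
  else if PySem.Str.startswith s "#" then (false, st.2)
  else (false, emitB st.2 (cutB l))

def strip_jai_comments_alt (text : String) (keep_test_header : Bool) : String :=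
  let st := (pvSplitKeep text.toList []).foldl stepB (keep_test_header, 0, [])
  PySem.Str.join "" st.2.2

-- ===== PRECONDITION & SPEC =====
def Spec_strip_jai_comments (text : String) (keep_test_header : Bool) (out : String) : Prop := out = strip_jai_comments_alt text keep_test_header
instance (text : String) (keep_test_header : Bool) (out : String) : Decidable (Spec_strip_jai_comments text keep_test_header out) := by unfold Spec_strip_jai_comments; infer_instance

-- ===== CLAIM (what is proved, stated in full; the proofs are below) =====
def Claim_equal_strip_jai_comments : Prop := ∀ (text : String) (keep_test_header : Bool), Dom_strip_jai_comments text keep_test_header → Spec_strip_jai_comments text keep_test_header (strip_jai_comments text keep_test_header)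

-- ===== LEMMAS AND PROOFS =====

-- the two inline-comment scanners find the same cut index
theorem cut_both : ∀ (n : Nat) (cs : List Char) (i : Nat), cs.length ≤ n →
    cutGoB cs i = inlineGoA cs i false false ∧
    cutGoB (skipStrB cs i).1 (skipStrB cs i).2 = inlineGoA cs i true false := by
  intro n
  induction n with
  | zero =>
    intro cs i h
    have hnil : cs = [] := List.length_eq_zero_iff.mp (Nat.le_zero.mp h)
    subst hnil
    exact ⟨by simp [cutGoB, inlineGoA], by simp [skipStrB, cutGoB, inlineGoA]⟩
  | succ n ih =>
    intro cs i h
    cases cs with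
    | nil => exact ⟨by simp [cutGoB, inlineGoA], by simp [skipStrB, cutGoB, inlineGoA]⟩
    | cons c rest =>
      have hr : rest.length ≤ n := by simpa using h
      constructor
      · by_cases hq : c = '"'
        · subst hq
          have h2 := (ih rest (i + 1) hr).2
          simpa [cutGoB, inlineGoA] using h2
        · by_cases hsh : c = '#'
          · subst hsh; simp [cutGoB, inlineGoA, hq]
          · have h1 := (ih rest (i + 1) hr).1
            simpa [cutGoB, inlineGoA, hq, hsh] using h1
      · by_cases hb : c = '\\'
        · subst hb
          have hdl : (rest.drop 1).length ≤ n := by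
            refine le_trans ?_ hr; simp
          have h2 := (ih (rest.drop 1) (i + 2) hdl).2
          have h1 : inlineGoA rest (i + 1) true true = inlineGoA (rest.drop 1) (i + 2) true false := by
            cases rest with
            | nil => simp [inlineGoA]
            | cons d r2 => simp [inlineGoA]
          simpa [skipStrB, inlineGoA, h1] using h2
        · by_cases hq : c = '"'
          · subst hq
            have h1 := (ih rest (i + 1) hr).1
            simpa [skipStrB, inlineGoA, hb] using h1
          · have h2 := (ih rest (i + 1) hr).2
            simpa [skipStrB, inlineGoA, hb, hq] using h2

theorem cutB_eq_inlineA : ∀ l, cutB l = inlineA l := by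
  intro l
  unfold cutB inlineA
  rw [(cut_both l.toList.length l.toList 0 le_rfl).1]

def hdrN : List String → Nat
  | [] => 0
  | l :: rest =>
    if PySem.Str.startswith (PySem.Str.lstrip l) "#" || (PySem.Str.strip (PySem.Str.lstrip l) == "") then
      hdrN rest + 1
    else 0

theorem hdrA_shift : ∀ (ls : List String) (k : Nat), hdrA ls k k = k + hdrN ls := by
  intro ls
  induction ls with
  | nil => intro k; simp [hdrA, hdrN]
  | cons l rest ih =>
    intro k
    simp only [hdrA, hdrN]
    cases h1 : PySem.Str.startswith (PySem.Str.lstrip l) "#" with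
    | true =>
      simp only [Bool.true_or, reduceIte]
      rw [ih]; omega
    | false =>
      simp only [Bool.false_or, Bool.false_eq_true, reduceIte]
      by_cases h2 : PySem.Str.strip (PySem.Str.lstrip l) = ""
      · rw [if_pos h2]
        simp only [h2, BEq.rfl, reduceIte]
        rw [ih]; omega
      · rw [if_neg h2]
        have hbeq : (PySem.Str.strip (PySem.Str.lstrip l) == "") = false := by
          simpa using h2
        simp only [hbeq, Bool.false_eq_true, reduceIte]
        omega

def bodyOut (ls : List String) : List String :=
  ls.filterMap (fun l => if PySem.Str.startswith (PySem.Str.lstrip l) "#" then none else some (inlineA l))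

theorem body_foldl : ∀ (ls : List String) (acc : List String),
    ls.foldl (fun acc l => if PySem.Str.startswith (PySem.Str.lstrip l) "#" then acc else acc ++ [inlineA l]) acc
      = acc ++ bodyOut ls := by
  intro ls
  induction ls with
  | nil => intro acc; simp [bodyOut]
  | cons l rest ih =>
    intro acc
    simp only [List.foldl_cons, bodyOut, List.filterMap_cons]
    cases hc : PySem.Str.startswith (PySem.Str.lstrip l) "#" with
    | true =>
      simp only [reduceIte]
      rw [ih]; rfl
    | false =>
      simp only [Bool.false_eq_true, reduceIte]
      rw [ih, List.append_assoc]; rfl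

def Aout (inh : Bool) (ls : List String) : List String :=
  if inh then ls.take (hdrN ls) ++ bodyOut (ls.drop (hdrN ls)) else bodyOut ls

theorem emit_eq : ∀ (b : Int) (acc : List String) (l : String),
    emitB (b, acc) l = ((collA (acc, b) l).2, (collA (acc, b) l).1) := by
  intro b acc l
  simp only [emitB, collA]
  split_ifs <;> rfl

theorem fuse : ∀ (ls : List String) (inh : Bool) (blank : Int) (acc : List String),
    (ls.foldl stepB (inh, blank, acc)).2.2 = ((Aout inh ls).foldl collA (acc, blank)).1 := by
  intro ls
  induction ls with
  | nil => intro inh blank acc; cases inh <;> simp [Aout, hdrN, bodyOut]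
  | cons l rest ih =>
    intro inh blank acc
    cases inh with
    | true =>
      by_cases hh : (PySem.Str.startswith (PySem.Str.lstrip l) "#" || (PySem.Str.strip (PySem.Str.lstrip l) == "")) = true
      · have hstep : stepB (true, blank, acc) l = (true, emitB (blank, acc) l) := by
          simp only [stepB, Bool.true_and, hh, reduceIte]
        have hA : Aout true (l :: rest) = l :: Aout true rest := by
          simp only [Aout, hdrN, hh, reduceIte, List.take_succ_cons, List.drop_succ_cons,
            List.cons_append]
      
        rw [List.foldl_cons, hstep, emit_eq, ih, hA, List.foldl_cons, Prod.mk.eta]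
      · have hhf : (PySem.Str.startswith (PySem.Str.lstrip l) "#" || (PySem.Str.strip (PySem.Str.lstrip l) == "")) = false :=
          Bool.not_eq_true _ ▸ (Bool.eq_false_iff.mpr (fun hx => hh hx))
        have hcmt : PySem.Str.startswith (PySem.Str.lstrip l) "#" = false :=
          (Bool.or_eq_false_iff.mp hhf).1
        have hstrip : (PySem.Str.strip (PySem.Str.lstrip l) == "") = false :=
          (Bool.or_eq_false_iff.mp hhf).2
        have hstep : stepB (true, blank, acc) l = (false, emitB (blank, acc) (cutB l)) := by
          simp only [stepB, Bool.true_and, hcmt, hstrip, Bool.false_or, Bool.false_eq_true,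
            reduceIte]
        have hA : Aout true (l :: rest) = inlineA l :: Aout false rest := by
          simp only [Aout, hdrN, hcmt, hstrip, Bool.false_or, Bool.false_eq_true, reduceIte,
            List.take_zero, List.drop_zero, List.nil_append, bodyOut, List.filterMap_cons]
        rw [List.foldl_cons, hstep, cutB_eq_inlineA, emit_eq, ih, hA, List.foldl_cons, Prod.mk.eta]
    | false =>
      cases hc : PySem.Str.startswith (PySem.Str.lstrip l) "#" with
      | true =>
        have hstep : stepB (false, blank, acc) l = (false, blank, acc) := by
          simp only [stepB, Bool.false_and, Bool.false_eq_true, reduceIte, hc]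
        have hA : Aout false (l :: rest) = Aout false rest := by
          simp only [Aout, Bool.false_eq_true, reduceIte, bodyOut, List.filterMap_cons, hc]
        rw [List.foldl_cons, hstep, hA, ih]
      | false =>
        have hstep : stepB (false, blank, acc) l = (false, emitB (blank, acc) (cutB l)) := by
          simp only [stepB, Bool.false_and, Bool.false_eq_true, reduceIte, hc]
        have hA : Aout false (l :: rest) = inlineA l :: Aout false rest := by
          simp only [Aout, Bool.false_eq_true, reduceIte, bodyOut, List.filterMap_cons, hc]
        rw [List.foldl_cons, hstep, cutB_eq_inlineA, emit_eq, ih, hA, List.foldl_cons, Prod.mk.eta]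

theorem ports_agree : ∀ (text : String) (keep : Bool),
    strip_jai_comments text keep = strip_jai_comments_alt text keep := by
  intro text keep
  simp only [strip_jai_comments, strip_jai_comments_alt]
  rw [body_foldl, fuse]
  cases keep with
  | false =>
    simp only [Bool.false_eq_true, reduceIte, Aout, List.take_zero, List.drop_zero,
      List.nil_append]
  | true =>
    rw [hdrA_shift]
    simp only [reduceIte, Aout, Nat.zero_add]

-- ===== VERDICT (by name: the statement is the Claim_ definition above) =====
theorem strip_jai_comments_spec : Claim_equal_strip_jai_comments := by
  intro text keep _
  unfold Spec_strip_jai_comments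
  exact ports_agree text keep
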